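-- pv_equiv track=rewrite | github.com/nixidekaoya/global_model | generate_dataset.py | from_ij_get_index
-- ===== SOURCE A (Python) =====
-- import itertools
--
-- def from_ij_get_index(i,j,item_number):
--     com = itertools.combinations(range(item_number),2)
--     c_list = []
--     for c in com:
--         c_list.append(c)
--     ij = (int(i),int(j))
--     if ij in c_list:
--         return c_list.index(ij)
--     else:
--         return -1
-- ===== SOURCE B (Python) =====
-- def from_ij_get_index(i, j, item_number):
--     # closed-form lexicographic index of (i, j) among 2-combinations of range(item_number)
--     if 0 <= i < j < item_number:
--         return i * (2 * item_number - i - 1) // 2 + (j - i - 1)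
--     return -1
-- ===== Notes on version B (the rewrite author's own statement) =====
-- stated objective: faster
-- what changed: Replaces enumerating all C(n,2) combinations and a linear list search with an O(1) closed-form combination-index formula plus a bounds check.
import Mathlib
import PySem

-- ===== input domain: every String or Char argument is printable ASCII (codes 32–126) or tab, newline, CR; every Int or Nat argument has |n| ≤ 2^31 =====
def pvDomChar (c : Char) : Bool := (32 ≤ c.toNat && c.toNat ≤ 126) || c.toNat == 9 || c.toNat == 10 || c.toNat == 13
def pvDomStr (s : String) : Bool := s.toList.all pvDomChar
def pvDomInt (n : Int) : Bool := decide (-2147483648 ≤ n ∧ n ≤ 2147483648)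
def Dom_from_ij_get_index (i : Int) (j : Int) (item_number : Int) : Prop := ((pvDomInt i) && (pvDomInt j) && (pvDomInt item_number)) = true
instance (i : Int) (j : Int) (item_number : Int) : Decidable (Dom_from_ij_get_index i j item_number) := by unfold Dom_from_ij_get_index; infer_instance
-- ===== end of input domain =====

-- B replaces A's O(n^2) enumeration of all 2-combinations with an O(1) closed-form index formula.

-- ===== PORT A =====
-- itertools.combinations(range(n), 2) in emission order, collected by the for-loop append
def comb2_py (n : Int) : List (Int × Int) :=
  (PySem.List.pyRange 0 n 1).foldl
    (fun acc a => acc ++ (PySem.List.pyRange (a + 1) n 1).map (fun b => (a, b))) []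

def from_ij_get_index (i : Int) (j : Int) (item_number : Int) : Int :=
  let c_list := comb2_py item_number
  let ij : Int × Int := (i, j)
  if ij ∈ c_list then
    match PySem.List.index? c_list ij with
    | some k => (k : Int)
    | none => -1
  else -1

-- ===== PORT B =====
def from_ij_get_index_alt (i : Int) (j : Int) (item_number : Int) : Int :=
  if 0 ≤ i ∧ i < j ∧ j < item_number then
    PySem.Int.floordiv (i * (2 * item_number - i - 1)) 2 + (j - i - 1)
  else -1

-- ===== PRECONDITION & SPEC =====
def Spec_from_ij_get_index (i : Int) (j : Int) (item_number : Int) (out : Int) : Prop := out = from_ij_get_index_alt i j item_number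
instance (i : Int) (j : Int) (item_number : Int) (out : Int) : Decidable (Spec_from_ij_get_index i j item_number out) := by unfold Spec_from_ij_get_index; infer_instance

-- ===== CLAIM (what is proved, stated in full; the proofs are below) =====
def Claim_equal_from_ij_get_index : Prop := ∀ (i : Int) (j : Int) (item_number : Int), Dom_from_ij_get_index i j item_number → Spec_from_ij_get_index i j item_number (from_ij_get_index i j item_number)

-- ===== LEMMAS AND PROOFS =====

-- c_list as a flatMap
lemma comb2_py_eq_flatMap (n : Int) :
    comb2_py n = (PySem.List.pyRange 0 n 1).flatMap
      (fun a => (PySem.List.pyRange (a + 1) n 1).map (fun b => (a, b))) := by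
  unfold comb2_py
  rw [PySem.List.foldl_append_eq_flatMap]
  simp

lemma mem_comb2_py (i j n : Int) :
    (i, j) ∈ comb2_py n ↔ 0 ≤ i ∧ i < j ∧ j < n := by
  rw [comb2_py_eq_flatMap]
  simp only [List.mem_flatMap, List.mem_map, PySem.List.mem_pyRange_one, Prod.mk.injEq]
  constructor
  · rintro ⟨a, ⟨ha0, han⟩, b, ⟨hab, hbn⟩, rfl, rfl⟩
    omega
  · rintro ⟨h0, hij, hjn⟩
    exact ⟨i, ⟨h0, by omega⟩, j, ⟨by omega, hjn⟩, rfl, rfl⟩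

-- index? through the pairing map
lemma index?_pair_map (m : Int) (l : List Int) (j : Int) :
    PySem.List.index? (l.map (fun b => (m, b))) (m, j) = PySem.List.index? l j := by
  induction l with
  | nil => rfl
  | cons x xs ih =>
    by_cases hx : x = j
    · subst hx
      rw [List.map_cons, PySem.List.index?_cons_self, PySem.List.index?_cons_self]
    · rw [List.map_cons,
        PySem.List.index?_cons_of_ne _ (by simp [hx]),
        PySem.List.index?_cons_of_ne _ hx, ih]

-- index? on a contiguous range
lemma index?_pyRange_one (a b x : Int) (h1 : a ≤ x) (h2 : x < b) :
    PySem.List.index? (PySem.List.pyRange a b 1) x = some (x - a).toNat := by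
  have hk : ∃ k : Nat, (x - a).toNat = k := ⟨_, rfl⟩
  obtain ⟨k, hk⟩ := hk
  rw [hk]
  induction k generalizing a with
  | zero =>
    have hax : a = x := by omega
    subst hax
    rw [PySem.List.pyRange_one_cons (by omega), PySem.List.index?_cons_self]
  | succ k ih =>
    rw [PySem.List.pyRange_one_cons (by omega),
      PySem.List.index?_cons_of_ne _ (by omega),
      ih (a + 1) (by omega) (by omega)]
    simp

-- index? on an append whose prefix misses the value
lemma index?_append_of_not_mem {α : Type} [BEq α] [LawfulBEq α] (l t : List α) (v : α)
    (h : v ∉ l) :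
    PySem.List.index? (l ++ t) v = (PySem.List.index? t v).map (· + l.length) := by
  induction l with
  | nil => simp
  | cons x xs ih =>
    have hx : x ≠ v := by intro hv; exact h (hv ▸ List.mem_cons_self)
    rw [List.cons_append, PySem.List.index?_cons_of_ne _ hx,
      ih (fun hv => h (List.mem_cons_of_mem _ hv))]
    cases PySem.List.index? t v with
    | none => simp
    | some k => simp; omega

-- main counting lemma: position of (i,j) in the flatMap starting from first coordinate m
lemma index?_comb_from (i j n : Int) (k : Nat) :
    ∀ m : Int, 0 ≤ m → m ≤ i → i < j → j < n →
      2 * (k : Int) = (i - m) * (2 * n - 1 - i - m) + 2 * (j - i - 1) →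
      PySem.List.index? ((PySem.List.pyRange m n 1).flatMap
        (fun a => (PySem.List.pyRange (a + 1) n 1).map (fun b => (a, b)))) (i, j) = some k := by
  induction k using Nat.strong_induction_on with
  | _ k ih =>
    intro m hm0 hmi hij hjn hk
    rw [PySem.List.pyRange_one_cons (by omega), List.flatMap_cons]
    by_cases hmi' : m = i
    · subst hmi'
      have hmem : (m, j) ∈ (PySem.List.pyRange (m + 1) n 1).map (fun b => (m, b)) := by
        simp only [List.mem_map, PySem.List.mem_pyRange_one]
        exact ⟨j, ⟨by omega, hjn⟩, rfl⟩
      rw [PySem.List.index?_append_of_mem _ hmem, index?_pair_map,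
        index?_pyRange_one _ _ _ (by omega) hjn]
      have hz : (m - m) * (2 * n - 1 - m - m) = 0 := by ring
      congr 1
      omega
    · have hlt : m < i := by omega
      have hnotmem : (i, j) ∉ (PySem.List.pyRange (m + 1) n 1).map (fun b => (m, b)) := by
        simp only [List.mem_map, Prod.mk.injEq]
        rintro ⟨b, _, rfl, rfl⟩
        omega
      rw [index?_append_of_not_mem _ _ _ hnotmem]
      have hnn : (0 : Int) ≤ (i - (m + 1)) * (2 * n - 1 - i - (m + 1)) :=
        mul_nonneg (by omega) (by omega)
      have hid : (i - m) * (2 * n - 1 - i - m)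
          = (i - (m + 1)) * (2 * n - 1 - i - (m + 1)) + (2 * n - 2 * m - 2) := by ring
      have hk' : (n - m - 1).toNat ≤ k := by omega
      have hkk : k - (n - m - 1).toNat < k := by omega
      rw [ih (k - (n - m - 1).toNat) hkk (m + 1) (by omega) (by omega) hij hjn (by omega)]
      simp only [Option.map_some, Option.some.injEq, List.length_map,
        PySem.List.length_pyRange_one]
      omega

-- the product i*(2n-i-1) is even
lemma even_prod (i n : Int) : ∃ q : Int, i * (2 * n - i - 1) = 2 * q := by
  rcases Int.even_or_odd i with ⟨t, ht⟩ | ⟨t, ht⟩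
  · exact ⟨t * (2 * n - i - 1), by rw [ht]; ring⟩
  · exact ⟨i * (n - t - 1), by rw [ht]; ring⟩

-- ===== VERDICT (by name: the statement is the Claim_ definition above) =====
theorem from_ij_get_index_spec : Claim_equal_from_ij_get_index := by
  intro i j n _
  unfold Spec_from_ij_get_index from_ij_get_index from_ij_get_index_alt
  by_cases hc : 0 ≤ i ∧ i < j ∧ j < n
  · obtain ⟨h0, hij, hjn⟩ := hc
    obtain ⟨q, hq⟩ := even_prod i n
    have hq0 : 0 ≤ q := by
      have : 0 ≤ i * (2 * n - i - 1) := mul_nonneg h0 (by omega)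
      omega
    have hfd : PySem.Int.floordiv (i * (2 * n - i - 1)) 2 = q := by
      rw [hq, PySem.Int.floordiv_eq_ediv_of_pos (by norm_num)]
      exact Int.mul_ediv_cancel_left q (by norm_num)
    have hq2 : (i - 0) * (2 * n - 1 - i - 0) = 2 * q := by
      rw [show (i - 0) * (2 * n - 1 - i - 0) = i * (2 * n - i - 1) from by ring, hq]
    have hidx : PySem.List.index? (comb2_py n) (i, j) = some (q + (j - i - 1)).toNat := by
      rw [comb2_py_eq_flatMap]
      exact index?_comb_from i j n _ 0 le_rfl h0 hij hjn (by omega)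
    have hmem : (i, j) ∈ comb2_py n := (mem_comb2_py i j n).mpr ⟨h0, hij, hjn⟩
    simp only [hmem, if_pos, hidx, hfd]
    rw [if_pos (show 0 ≤ i ∧ i < j ∧ j < n from ⟨h0, hij, hjn⟩)]
    omega
  · have hnm : (i, j) ∉ comb2_py n := fun h => hc ((mem_comb2_py i j n).mp h)
    simp [hnm, hc]
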